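-- pv_equiv track=rewrite | github.com/mammadsafar/Astrology | backend/get chart/cal power number/flet2.py | investment
-- ===== SOURCE A (Python) =====
-- def investment(birthNumber):
--     investment_options = {
--         'Stock Market': [1, 2, 3, 4, 6, 7, 8, 9],
--         'Trade': [1, 7, 8, 9],
--         'Gold and Metals': [2, 3, 5]
--     }
--     investments = [key for key, numbers in investment_options.items() if birthNumber in numbers]
--     return investments
-- ===== SOURCE B (Python) =====
-- _TABLE = {
--     1: ['Stock Market', 'Trade'],
--     2: ['Stock Market', 'Gold and Metals'],
--     3: ['Stock Market', 'Gold and Metals'],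
--     4: ['Stock Market'],
--     5: ['Gold and Metals'],
--     6: ['Stock Market'],
--     7: ['Stock Market', 'Trade'],
--     8: ['Stock Market', 'Trade'],
--     9: ['Stock Market', 'Trade'],
-- }
--
-- def investment(birthNumber):
--     return list(_TABLE.get(birthNumber, []))
-- ===== Notes on version B (the rewrite author's own statement) =====
-- stated objective: idiomatic
-- what changed: Replaces the category-to-numbers dict plus per-category membership scan with a precomputed reverse lookup table keyed by birth number, so each call is a single dict lookup returning a fresh list.
import Mathlib
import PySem

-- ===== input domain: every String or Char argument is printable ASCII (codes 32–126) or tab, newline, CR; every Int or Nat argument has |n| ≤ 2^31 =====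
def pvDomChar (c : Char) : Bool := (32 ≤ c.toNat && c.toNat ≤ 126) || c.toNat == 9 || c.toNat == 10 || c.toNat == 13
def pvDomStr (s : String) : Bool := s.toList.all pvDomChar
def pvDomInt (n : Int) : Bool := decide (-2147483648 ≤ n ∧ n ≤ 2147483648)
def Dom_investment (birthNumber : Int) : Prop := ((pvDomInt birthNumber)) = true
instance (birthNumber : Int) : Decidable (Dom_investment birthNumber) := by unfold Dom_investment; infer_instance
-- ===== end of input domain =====

-- ===== PORT A =====
-- B replaces the category scan with a precomputed birth-number → categories lookup table (idiomatic; return value only).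
def investmentOptions : List (String × List Int) :=
  [("Stock Market", [1, 2, 3, 4, 6, 7, 8, 9]),
   ("Trade", [1, 7, 8, 9]),
   ("Gold and Metals", [2, 3, 5])]

def investment (birthNumber : Int) : List String :=
  (investmentOptions.filter (fun kv => kv.2.contains birthNumber)).map (fun kv => kv.1)

-- ===== PORT B =====
def investmentTable : PySem.Dict Int (List String) :=
  PySem.Dict.ofList [(1, ["Stock Market", "Trade"]),
   (2, ["Stock Market", "Gold and Metals"]),
   (3, ["Stock Market", "Gold and Metals"]),
   (4, ["Stock Market"]),
   (5, ["Gold and Metals"]),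
   (6, ["Stock Market"]),
   (7, ["Stock Market", "Trade"]),
   (8, ["Stock Market", "Trade"]),
   (9, ["Stock Market", "Trade"])]

def investment_alt (birthNumber : Int) : List String :=
  PySem.Dict.getD investmentTable birthNumber []

-- ===== PRECONDITION & SPEC =====
def Spec_investment (birthNumber : Int) (out : List String) : Prop := out = investment_alt birthNumber
instance (birthNumber : Int) (out : List String) : Decidable (Spec_investment birthNumber out) := by unfold Spec_investment; infer_instance

-- ===== CLAIM (what is proved, stated in full; the proofs are below) =====
def Claim_equal_investment : Prop := ∀ (birthNumber : Int), Dom_investment birthNumber → Spec_investment birthNumber (investment birthNumber)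

-- ===== LEMMAS AND PROOFS =====

-- ===== VERDICT (by name: the statement is the Claim_ definition above) =====
theorem investmentTable_items : investmentTable =
    PySem.Dict.mk
      [(1, ["Stock Market", "Trade"]),
       (2, ["Stock Market", "Gold and Metals"]),
       (3, ["Stock Market", "Gold and Metals"]),
       (4, ["Stock Market"]),
       (5, ["Gold and Metals"]),
       (6, ["Stock Market"]),
       (7, ["Stock Market", "Trade"]),
       (8, ["Stock Market", "Trade"]),
       (9, ["Stock Market", "Trade"])] := by decide

set_option maxRecDepth 4096 in
theorem investment_spec : Claim_equal_investment := by
  intro n _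
  unfold Spec_investment investment investment_alt investmentOptions
  rw [investmentTable_items]
  by_cases h1 : n = 1 <;> by_cases h2 : n = 2 <;> by_cases h3 : n = 3 <;>
    by_cases h4 : n = 4 <;> by_cases h5 : n = 5 <;> by_cases h6 : n = 6 <;>
    by_cases h7 : n = 7 <;> by_cases h8 : n = 8 <;> by_cases h9 : n = 9 <;>
    try (subst_vars; decide)
  simp only [PySem.Dict.getD, PySem.Dict.get?_mk_cons, List.filter, List.contains]
  split_ifs <;> simp only [beq_iff_eq] at * <;> first | omega | simp [PySem.Dict.get?, h1, h2, h3, h4, h5, h6, h7, h8, h9]
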